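-- pv_equiv track=rewrite | github.com/ThomasReyel/Estrutura-de-dados | Semana 5/lista.py | buscaListaBin
-- ===== SOURCE A (Python) =====
-- def buscaListaBin(lista, key): # 1
--     esq, dir = 0, len(lista) - 1 # 1 + 1
--     primeiro = -1  # 1
--     while esq <= dir: #(log2 n) +1
--         meio = (esq + dir) // 2 #(log2 n)
--         if lista[meio] < key: #(log2 n)
--             esq = meio + 1
--         elif lista[meio] > key:
--             dir = meio - 1
--         else:
--             primeiro = meio
--             dir = meio - 1
--     if primeiro == -1: # 0
--         return []  # 0
--     esq, dir = primeiro, len(lista) - 1 # 1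
--     ultimo = primeiro # 1
--     while esq <= dir: #(log2 n) + 1
--         meio = (esq + dir) // 2 #(log2 n)
--         if lista[meio] == key: #(log2 n)
--             ultimo = meio
--             esq = meio + 1
--         else:
--             dir = meio - 1
--     return list(range(primeiro, ultimo + 1)) #1
-- ===== SOURCE B (Python) =====
-- def buscaListaBin(lista, key):
--     return [i for i, v in enumerate(lista) if v == key]
-- ===== Notes on version B (the rewrite author's own statement) =====
-- stated objective: simpler
-- what changed: Replaces the two hand-written binary-search loops (primeiro/ultimo accumulators, early return, range construction) by a single linear enumerate-and-filter pass that collects the indices holding the key directly; on a sorted list those indices are exactly A's contiguous range.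
-- outside the precondition, e.g. on buscaListaBin([2, 1], 1): A returns [], B returns [1]
import Mathlib
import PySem

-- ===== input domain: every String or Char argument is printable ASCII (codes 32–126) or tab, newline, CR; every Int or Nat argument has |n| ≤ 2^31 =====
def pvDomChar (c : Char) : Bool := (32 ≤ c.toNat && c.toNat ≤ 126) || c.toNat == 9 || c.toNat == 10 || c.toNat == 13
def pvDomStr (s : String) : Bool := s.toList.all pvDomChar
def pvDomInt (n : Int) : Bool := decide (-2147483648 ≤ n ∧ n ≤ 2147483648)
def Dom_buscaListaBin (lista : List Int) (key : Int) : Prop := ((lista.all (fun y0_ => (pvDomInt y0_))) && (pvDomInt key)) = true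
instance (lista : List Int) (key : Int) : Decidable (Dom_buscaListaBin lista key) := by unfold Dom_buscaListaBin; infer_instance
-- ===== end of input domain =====

-- B replaces A's two hand-written binary-search loops (primeiro/ultimo accumulators,
-- early return) by a single linear enumerate-and-filter pass collecting the indices
-- that hold the key: same output on every sorted input (objective: simpler).


-- ===== PORT A =====
-- first while-loop of A: fuel-based transliteration (fuel = len+1 always suffices: the
-- window [esq,dir] shrinks each iteration); lista[meio] is provably in range whenever
-- the loop body runs from A's entry state, so pyGetD's default is never used.
def buscaLoop1 (lista : List Int) (key : Int) : Nat → Int → Int → Int → Int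
  | 0, _, _, primeiro => primeiro
  | fuel + 1, esq, dir, primeiro =>
    if esq ≤ dir then
      let meio := PySem.Int.floordiv (esq + dir) 2
      let v := PySem.List.pyGetD lista meio 0
      if v < key then buscaLoop1 lista key fuel (meio + 1) dir primeiro
      else if v > key then buscaLoop1 lista key fuel esq (meio - 1) primeiro
      else buscaLoop1 lista key fuel esq (meio - 1) meio
    else primeiro

-- second while-loop of A (same fuel/indexing remarks)
def buscaLoop2 (lista : List Int) (key : Int) : Nat → Int → Int → Int → Int
  | 0, _, _, ultimo => ultimo
  | fuel + 1, esq, dir, ultimo =>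
    if esq ≤ dir then
      let meio := PySem.Int.floordiv (esq + dir) 2
      if PySem.List.pyGetD lista meio 0 = key then buscaLoop2 lista key fuel (meio + 1) dir meio
      else buscaLoop2 lista key fuel esq (meio - 1) ultimo
    else ultimo

def buscaListaBin (lista : List Int) (key : Int) : List Int :=
  let primeiro := buscaLoop1 lista key (lista.length + 1) 0 ((lista.length : Int) - 1) (-1)
  if primeiro = -1 then []
  else
    let ultimo := buscaLoop2 lista key (lista.length + 1) primeiro ((lista.length : Int) - 1) primeiro
    PySem.List.pyRange primeiro (ultimo + 1) 1

-- ===== PORT B =====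
-- Source B's '[i for i, v in enumerate(lista) if v == key]': one linear pass over
-- enumerate(lista), keeping the index of every element equal to the key
def buscaListaBin_alt (lista : List Int) (key : Int) : List Int :=
  (PySem.List.enumerate lista 0).filterMap (fun p => if p.2 = key then some p.1 else none)

-- ===== PRECONDITION & SPEC =====
-- Pre_ excludes unsorted lists that contain the key: binary search presupposes a sorted
-- list, and on such inputs the index set A returns is an accident of which midpoints its
-- two searches happen to probe (no one would specify either program's value there).
-- Unsorted lists NOT containing the key stay inside: there both programs return [].
def Pre_buscaListaBin (lista : List Int) (key : Int) : Prop :=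
  List.Pairwise (· ≤ ·) lista ∨ key ∉ lista
instance (lista : List Int) (key : Int) : Decidable (Pre_buscaListaBin lista key) := by
  unfold Pre_buscaListaBin; infer_instance

def pvWitness_buscaListaBin : List Int × Int := ([1, 2, 2, 3], 2)

def Spec_buscaListaBin (lista : List Int) (key : Int) (out : List Int) : Prop := out = buscaListaBin_alt lista key
instance (lista : List Int) (key : Int) (out : List Int) : Decidable (Spec_buscaListaBin lista key out) := by unfold Spec_buscaListaBin; infer_instance

-- ===== CLAIM (what is proved, stated in full; the proofs are below) =====
def Claim_equal_buscaListaBin : Prop := ∀ (lista : List Int) (key : Int), Dom_buscaListaBin lista key → Pre_buscaListaBin lista key → Spec_buscaListaBin lista key (buscaListaBin lista key)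

-- ===== LEMMAS AND PROOFS =====

-- on a sorted list, lista[m] < key exactly on the indices below bisect_left
lemma pvGetD_lt_iff (lista : List Int) (key : Int)
    (hs : List.Pairwise (· ≤ ·) lista) (m : Int) (h0 : 0 ≤ m) (h1 : m < (lista.length : Int)) :
    PySem.List.pyGetD lista m 0 < key ↔ m < (PySem.List.bisectLeft lista key : Int) := by
  have h2 : m.toNat < lista.length := by omega
  rw [PySem.List.pyGetD_eq_getElem lista 0 h0 h1]
  obtain ⟨_, hA, hB⟩ := PySem.List.bisectLeft_spec lista key hs
  constructor
  · intro hv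
    by_contra hge
    have := hB m.toNat h2 (by omega)
    omega
  · intro hm
    have := hA m.toNat h2 (by omega)
    omega

-- on a sorted list, lista[m] ≤ key exactly on the indices below bisect_right
lemma pvGetD_le_iff (lista : List Int) (key : Int)
    (hs : List.Pairwise (· ≤ ·) lista) (m : Int) (h0 : 0 ≤ m) (h1 : m < (lista.length : Int)) :
    PySem.List.pyGetD lista m 0 ≤ key ↔ m < (PySem.List.bisectRight lista key : Int) := by
  have h2 : m.toNat < lista.length := by omega
  rw [PySem.List.pyGetD_eq_getElem lista 0 h0 h1]
  obtain ⟨_, hA, hB⟩ := PySem.List.bisectRight_spec lista key hs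
  constructor
  · intro hv
    by_contra hge
    have := hB m.toNat h2 (by omega)
    omega
  · intro hm
    have := hA m.toNat h2 (by omega)
    omega

lemma bisectLeft_le_bisectRight (lista : List Int) (key : Int)
    (hs : List.Pairwise (· ≤ ·) lista) :
    PySem.List.bisectLeft lista key ≤ PySem.List.bisectRight lista key := by
  obtain ⟨hln, hA, _⟩ := PySem.List.bisectLeft_spec lista key hs
  obtain ⟨_, _, hB⟩ := PySem.List.bisectRight_spec lista key hs
  by_contra hlt
  have h2 : PySem.List.bisectRight lista key < lista.length := by omega
  have := hA (PySem.List.bisectRight lista key) h2 (by omega)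
  have := hB (PySem.List.bisectRight lista key) h2 (by omega)
  omega

-- A's first loop finds bisect_left when the key occurs, else -1
lemma loop1_eq (lista : List Int) (key : Int) (hs : List.Pairwise (· ≤ ·) lista) :
    ∀ (fuel : Nat) (esq dir p : Int),
      (dir + 1 - esq).toNat < fuel →
      0 ≤ esq → dir < (lista.length : Int) →
      esq ≤ (PySem.List.bisectLeft lista key : Int) →
      ((p = -1 ∧ ((PySem.List.bisectLeft lista key : Int) < (PySem.List.bisectRight lista key : Int) →
                  (PySem.List.bisectLeft lista key : Int) ≤ dir)) ∨
       ((PySem.List.bisectLeft lista key : Int) ≤ p ∧ p < (PySem.List.bisectRight lista key : Int) ∧ p ≤ dir + 1)) →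
      buscaLoop1 lista key fuel esq dir p =
        if (PySem.List.bisectLeft lista key : Int) < (PySem.List.bisectRight lista key : Int)
        then (PySem.List.bisectLeft lista key : Int) else -1 := by
  intro fuel
  induction fuel with
  | zero => intro esq dir p hf; omega
  | succ fuel ih =>
    intro esq dir p hf h0 h1 h2 hinv
    by_cases hed : esq ≤ dir
    · have hmb := PySem.Int.floordiv_two_mid_bounds hed
      set meio := PySem.Int.floordiv (esq + dir) 2 with hm
      have hlt := pvGetD_lt_iff lista key hs meio (by omega) (by omega)
      have hle := pvGetD_le_iff lista key hs meio (by omega) (by omega)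
      simp only [buscaLoop1, if_pos hed, ← hm]
      by_cases hv1 : PySem.List.pyGetD lista meio 0 < key
      · rw [if_pos hv1]
        apply ih _ _ _ (by omega) (by omega) h1 (by omega)
        rcases hinv with ⟨hp, hw⟩ | ⟨ha, hb, hc⟩
        · exact Or.inl ⟨hp, hw⟩
        · exact Or.inr ⟨ha, hb, hc⟩
      · rw [if_neg hv1]
        by_cases hv2 : PySem.List.pyGetD lista meio 0 > key
        · -- lista[meio] > key: meio ≥ bisectRight
          have hR : (PySem.List.bisectRight lista key : Int) ≤ meio := by
            by_contra hc; exact absurd (hle.mpr (by omega)) (by omega)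
          rw [if_pos hv2]
          apply ih _ _ _ (by omega) h0 (by omega) h2
          rcases hinv with ⟨hp, hw⟩ | ⟨ha, hb, hc⟩
          · exact Or.inl ⟨hp, fun h => by omega⟩
          · exact Or.inr ⟨ha, hb, by omega⟩
        · -- lista[meio] = key: bisectLeft ≤ meio < bisectRight
          have hEl : (PySem.List.bisectLeft lista key : Int) ≤ meio := by
            by_contra hc; exact absurd (hlt.mpr (by omega)) hv1
          have hEr : meio < (PySem.List.bisectRight lista key : Int) := hle.mp (by omega)
          rw [if_neg hv2]
          apply ih _ _ _ (by omega) h0 (by omega) h2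
          exact Or.inr ⟨hEl, hEr, by omega⟩
    · simp only [buscaLoop1, if_neg hed]
      rcases hinv with ⟨hp, hw⟩ | ⟨ha, hb, hc⟩
      · split_ifs with h
        · exact absurd (hw h) (by omega)
        · exact hp
      · rw [if_pos (by omega)]; omega

-- A's second loop, started at bisect_left, finds bisect_right - 1
lemma loop2_eq (lista : List Int) (key : Int) (hs : List.Pairwise (· ≤ ·) lista) :
    ∀ (fuel : Nat) (esq dir u : Int),
      (dir + 1 - esq).toNat < fuel →
      (PySem.List.bisectLeft lista key : Int) ≤ esq → dir < (lista.length : Int) →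
      (PySem.List.bisectLeft lista key : Int) ≤ u → u < (PySem.List.bisectRight lista key : Int) →
      esq - 1 ≤ u →
      ((PySem.List.bisectRight lista key : Int) - 1 ≤ dir ∨
       (esq = (PySem.List.bisectRight lista key : Int) ∧ u = (PySem.List.bisectRight lista key : Int) - 1)) →
      buscaLoop2 lista key fuel esq dir u = (PySem.List.bisectRight lista key : Int) - 1 := by
  intro fuel
  induction fuel with
  | zero => intro esq dir u hf; omega
  | succ fuel ih =>
    intro esq dir u hf hL h1 hu1 hu2 hu3 hdisj
    by_cases hed : esq ≤ dir
    · have hmb := PySem.Int.floordiv_two_mid_bounds hed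
      set meio := PySem.Int.floordiv (esq + dir) 2 with hm
      have hlt := pvGetD_lt_iff lista key hs meio (by omega) (by omega)
      have hle := pvGetD_le_iff lista key hs meio (by omega) (by omega)
      simp only [buscaLoop2, if_pos hed, ← hm]
      by_cases hv : PySem.List.pyGetD lista meio 0 = key
      · -- lista[meio] = key: meio < bisectRight, impossible if esq already = bisectRight
        have hEr : meio < (PySem.List.bisectRight lista key : Int) := hle.mp (by omega)
        rw [if_pos hv]
        apply ih _ _ _ (by omega) (by omega) h1 (by omega) hEr (by omega)
        rcases hdisj with h | ⟨he, _⟩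
        · exact Or.inl h
        · omega
      · -- lista[meio] ≠ key and meio ≥ esq ≥ bisectLeft, so meio ≥ bisectRight
        have hEl : ¬ PySem.List.pyGetD lista meio 0 < key := fun hc =>
          absurd (hlt.mp hc) (by omega)
        have hR : (PySem.List.bisectRight lista key : Int) ≤ meio := by
          by_contra hc
          have := hle.mpr (by omega)
          omega
        rw [if_neg hv]
        exact ih _ _ _ (by omega) hL (by omega) hu1 hu2 hu3 (Or.inl (by omega))
    · simp only [buscaLoop2, if_neg hed]
      rcases hdisj with h | ⟨_, h⟩ <;> omega

-- empty Python range
lemma pyRange_one_nil (a b : Int) (h : b ≤ a) : PySem.List.pyRange a b 1 = [] := by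
  rw [PySem.List.pyRange_one]
  have : (b - a).toNat = 0 := by omega
  simp [this]

-- when the key does not occur, A's first loop never fires its equality branch
lemma loop1_absent (lista : List Int) (key : Int) (hx : key ∉ lista) :
    ∀ (fuel : Nat) (esq dir p : Int), 0 ≤ esq → dir < (lista.length : Int) →
      buscaLoop1 lista key fuel esq dir p = p := by
  intro fuel
  induction fuel with
  | zero => intro esq dir p _ _; rfl
  | succ fuel ih =>
    intro esq dir p h0 h1
    by_cases hed : esq ≤ dir
    · have hmb := PySem.Int.floordiv_two_mid_bounds hed
      set meio := PySem.Int.floordiv (esq + dir) 2 with hm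
      have hmem : PySem.List.pyGetD lista meio 0 ∈ lista :=
        PySem.List.pyGetD_mem lista 0 ⟨by omega, by omega⟩
      simp only [buscaLoop1, if_pos hed, ← hm]
      by_cases hv1 : PySem.List.pyGetD lista meio 0 < key
      · rw [if_pos hv1]; exact ih _ _ _ (by omega) h1
      · rw [if_neg hv1]
        by_cases hv2 : PySem.List.pyGetD lista meio 0 > key
        · rw [if_pos hv2]; exact ih _ _ _ h0 (by omega)
        · rw [if_neg hv2]
          have heq : PySem.List.pyGetD lista meio 0 = key := by omega
          exact absurd (heq ▸ hmem) hx
    · simp only [buscaLoop1, if_neg hed]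

-- B's pass keeps nothing when the key does not occur
lemma alt_absent (lista : List Int) (key : Int) (hx : key ∉ lista) :
    buscaListaBin_alt lista key = [] := by
  unfold buscaListaBin_alt
  rw [List.filterMap_eq_nil_iff]
  intro p hp
  obtain ⟨k, hk, rfl⟩ := (PySem.List.mem_enumerate_iff _ _ _).mp hp
  have hmem : lista[k] ∈ lista := List.getElem_mem hk
  exact if_neg (by intro h; exact hx (h ▸ hmem))

-- on a sorted list, B's kept indices are exactly the interval [bisect_left, bisect_right)
lemma alt_eq_pyRange (lista : List Int) (key : Int)
    (hs : List.Pairwise (· ≤ ·) lista) :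
    buscaListaBin_alt lista key =
      PySem.List.pyRange (PySem.List.bisectLeft lista key : Int)
        (PySem.List.bisectRight lista key : Int) 1 := by
  -- characterise membership: index k holds the key iff bisect_left ≤ k < bisect_right
  have hchar : ∀ (k : Nat) (hk : k < lista.length),
      lista[k] = key ↔ ((PySem.List.bisectLeft lista key : Int) ≤ (k : Int) ∧
                        (k : Int) < (PySem.List.bisectRight lista key : Int)) := by
    intro k hk
    obtain ⟨_, hA, hB⟩ := PySem.List.bisectLeft_spec lista key hs
    obtain ⟨_, hA', hB'⟩ := PySem.List.bisectRight_spec lista key hs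
    constructor
    · intro he
      constructor
      · by_contra hc
        have := hA k hk (by omega)
        omega
      · by_contra hc
        have := hB' k hk (by omega)
        omega
    · intro ⟨h1, h2⟩
      have := hB k hk (by omega)
      have := hA' k hk (by omega)
      omega
  -- both sides are strictly increasing and have the same members, hence equal
  have hpw : (buscaListaBin_alt lista key).Pairwise (· < ·) := by
    unfold buscaListaBin_alt
    rw [List.pairwise_filterMap]
    apply (PySem.List.pairwise_lt_enumerate lista 0).imp
    intro p q hpq x hx y hy
    split_ifs at hx hy <;> simp_all
  have hmem : ∀ x, x ∈ buscaListaBin_alt lista key ↔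
      x ∈ PySem.List.pyRange (PySem.List.bisectLeft lista key : Int)
            (PySem.List.bisectRight lista key : Int) 1 := by
    intro x
    rw [PySem.List.mem_pyRange_one]
    unfold buscaListaBin_alt
    rw [List.mem_filterMap]
    constructor
    · rintro ⟨p, hp, hpx⟩
      obtain ⟨k, hk, rfl⟩ := (PySem.List.mem_enumerate_iff _ _ _).mp hp
      simp only at hpx
      split_ifs at hpx with he
      · obtain rfl : (0 : Int) + (k : Int) = x := Option.some.inj hpx
        have := (hchar k hk).mp he
        constructor <;> omega
    · rintro ⟨h1, h2⟩
      obtain ⟨hln, _, _⟩ := PySem.List.bisectRight_spec lista key hs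
      have hk : x.toNat < lista.length := by omega
      refine ⟨((0 : Int) + (x.toNat : Int), lista[x.toNat]), ?_, ?_⟩
      · exact (PySem.List.mem_enumerate_iff _ _ _).mpr ⟨x.toNat, hk, rfl⟩
      · have he : lista[x.toNat] = key := (hchar x.toNat hk).mpr ⟨by omega, by omega⟩
        simp only [if_pos he, Option.some.injEq]
        omega
  have hperm : (buscaListaBin_alt lista key).Perm
      (PySem.List.pyRange (PySem.List.bisectLeft lista key : Int)
        (PySem.List.bisectRight lista key : Int) 1) :=
    (List.perm_ext_iff_of_nodup (hpw.imp (fun h => by omega))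
      (PySem.List.nodup_pyRange_one _ _)).mpr hmem
  exact List.Perm.eq_of_pairwise (fun a b _ _ h1 h2 => by omega) hpw
    (PySem.List.pairwise_lt_pyRange_one _ _) hperm

-- ===== VERDICT (by name: the statement is the Claim_ definition above) =====
theorem buscaListaBin_spec : Claim_equal_buscaListaBin := by
  intro lista key _ hpre
  unfold Spec_buscaListaBin buscaListaBin
  rcases hpre with hs | hx
  case inr =>
    -- key absent: A's first loop leaves primeiro = -1, and B keeps no index
    rw [loop1_absent lista key hx _ _ _ _ (by omega) (by omega), if_pos rfl,
      alt_absent lista key hx]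
  obtain ⟨hlen, _, _⟩ := PySem.List.bisectLeft_spec lista key hs
  obtain ⟨hlen', _, _⟩ := PySem.List.bisectRight_spec lista key hs
  have hLR := bisectLeft_le_bisectRight lista key hs
  rw [alt_eq_pyRange lista key hs]
  have h1 : buscaLoop1 lista key (lista.length + 1) 0 ((lista.length : Int) - 1) (-1) =
      if (PySem.List.bisectLeft lista key : Int) < (PySem.List.bisectRight lista key : Int)
      then (PySem.List.bisectLeft lista key : Int) else -1 := by
    apply loop1_eq lista key hs _ _ _ _ (by omega) (by omega) (by omega) (by omega)
    exact Or.inl ⟨rfl, fun h => by omega⟩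
  by_cases hk : (PySem.List.bisectLeft lista key : Int) < (PySem.List.bisectRight lista key : Int)
  · rw [h1, if_pos hk]
    rw [if_neg (by omega)]
    have h2 : buscaLoop2 lista key (lista.length + 1) (PySem.List.bisectLeft lista key : Int)
        ((lista.length : Int) - 1) (PySem.List.bisectLeft lista key : Int) =
        (PySem.List.bisectRight lista key : Int) - 1 :=
      loop2_eq lista key hs _ _ _ _ (by omega) (by omega) (by omega) (by omega) hk (by omega)
        (Or.inl (by omega))
    rw [h2]
    norm_num
  · rw [h1, if_neg hk, if_pos rfl]
    exact (pyRange_one_nil _ _ (by omega)).symm
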